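-- pv_equiv track=rewrite | github.com/Hugoat22/Gomoku-IA | game.py | _cases_alignees
-- ===== SOURCE A (Python) =====
-- PAD = 4
--
-- def _cases_alignees(x : int, y : int, direction : int, debut : int) -> list:
--     cases = []
--     for k in range(5):
--         if direction == 0:    # horizontal
--             cases.append((y, x - PAD + debut + k))
--         elif direction == 1:  # vertical
--             cases.append((y - PAD + debut + k, x))
--         elif direction == 2:  # diagonale principale
--             cases.append((y - PAD + debut + k, x - PAD + debut + k))
--         else:                 # anti-diagonale
--             cases.append((y - PAD + debut + k, x + PAD - debut - k))
--     return cases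
-- ===== SOURCE B (Python) =====
-- PAD = 4
--
-- def _cases_alignees(x : int, y : int, direction : int, debut : int) -> list:
--     # Marching algorithm: compute the FIRST cell of the window once, then walk
--     # recursively, each cell obtained by adding the step vector to the previous
--     # one. No per-iteration branching and no per-index offset arithmetic.
--     def walk(cell, step, n):
--         if n == 0:
--             return []
--         return [cell] + walk((cell[0] + step[0], cell[1] + step[1]), step, n - 1)
--
--     if direction == 0:      # horizontal
--         start, step = (y, x + debut - PAD), (0, 1)
--     elif direction == 1:    # vertical
--         start, step = (y + debut - PAD, x), (1, 0)
--     elif direction == 2:    # main diagonal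
--         start, step = (y + debut - PAD, x + debut - PAD), (1, 1)
--     else:                   # anti-diagonal
--         start, step = (y + debut - PAD, x - debut + PAD), (1, -1)
--     return walk(start, step, 5)
-- ===== Notes on version B (the rewrite author's own statement) =====
-- stated objective: alternative
-- what changed: Instead of recomputing each cell from its index k inside a 4-way branch, B computes the first cell of the window once and then marches recursively, producing each next cell by adding a constant step vector to the previous one.
import Mathlib
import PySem

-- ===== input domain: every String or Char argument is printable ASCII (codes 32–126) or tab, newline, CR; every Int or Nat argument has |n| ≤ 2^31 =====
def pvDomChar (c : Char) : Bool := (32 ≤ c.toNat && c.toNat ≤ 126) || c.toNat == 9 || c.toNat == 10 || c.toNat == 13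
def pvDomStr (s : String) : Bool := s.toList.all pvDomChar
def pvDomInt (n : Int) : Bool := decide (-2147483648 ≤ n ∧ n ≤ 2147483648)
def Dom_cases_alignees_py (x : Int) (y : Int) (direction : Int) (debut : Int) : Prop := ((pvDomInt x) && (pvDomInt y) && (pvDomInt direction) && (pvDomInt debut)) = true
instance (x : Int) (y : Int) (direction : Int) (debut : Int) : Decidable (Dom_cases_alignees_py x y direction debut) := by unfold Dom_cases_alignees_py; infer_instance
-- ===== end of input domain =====

-- B computes the window's first cell once and marches recursively by a constant step vector, instead of A's per-index arithmetic inside a 4-way branch per iteration (alternative; same O(1) cost).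
-- ===== PORT A =====
def pvPAD : Int := 4

def cases_alignees_py (x : Int) (y : Int) (direction : Int) (debut : Int) : List (Int × Int) :=
  (PySem.List.pyRange 0 5 1).foldl (fun cases k =>
    if direction == 0 then cases ++ [(y, x - pvPAD + debut + k)]
    else if direction == 1 then cases ++ [(y - pvPAD + debut + k, x)]
    else if direction == 2 then cases ++ [(y - pvPAD + debut + k, x - pvPAD + debut + k)]
    else cases ++ [(y - pvPAD + debut + k, x + pvPAD - debut - k)]) []

-- ===== PORT B =====
def pvWalk (cell : Int × Int) (step : Int × Int) : Nat → List (Int × Int)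
  | 0 => []
  | n + 1 => cell :: pvWalk (cell.1 + step.1, cell.2 + step.2) step n

def cases_alignees_py_alt (x : Int) (y : Int) (direction : Int) (debut : Int) : List (Int × Int) :=
  let sd : (Int × Int) × (Int × Int) :=
    if direction == 0 then ((y, x + debut - pvPAD), (0, 1))
    else if direction == 1 then ((y + debut - pvPAD, x), (1, 0))
    else if direction == 2 then ((y + debut - pvPAD, x + debut - pvPAD), (1, 1))
    else ((y + debut - pvPAD, x - debut + pvPAD), (1, -1))
  pvWalk sd.1 sd.2 5

-- ===== PRECONDITION & SPEC =====
def Spec_cases_alignees_py (x : Int) (y : Int) (direction : Int) (debut : Int) (out : List (Int × Int)) : Prop := out = cases_alignees_py_alt x y direction debut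
instance (x : Int) (y : Int) (direction : Int) (debut : Int) (out : List (Int × Int)) : Decidable (Spec_cases_alignees_py x y direction debut out) := by unfold Spec_cases_alignees_py; infer_instance

-- ===== CLAIM =====
def Claim_equal_cases_alignees_py : Prop := ∀ (x : Int) (y : Int) (direction : Int) (debut : Int), Dom_cases_alignees_py x y direction debut → Spec_cases_alignees_py x y direction debut (cases_alignees_py x y direction debut)

-- ===== LEMMAS AND PROOFS =====

-- ===== VERDICT =====
theorem cases_alignees_py_spec : Claim_equal_cases_alignees_py := by
  intro x y direction debut _
  unfold Spec_cases_alignees_py cases_alignees_py cases_alignees_py_alt pvPAD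
  have h : PySem.List.pyRange 0 5 1 = [0, 1, 2, 3, 4] := by decide
  rw [h]
  by_cases h0 : direction == 0 <;> by_cases h1 : direction == 1 <;>
    by_cases h2 : direction == 2 <;>
    simp [h0, h1, h2, List.foldl, pvWalk, Prod.mk.injEq] <;> omega
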